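-- pv_equiv track=rewrite | github.com/labdao/plex | tools/generator/generators/RFdiffProteinMPNN.py | _reinsert_deletions
-- ===== SOURCE A (Python) =====
-- def _reinsert_deletions(modified_seq, permissibility_vector):
--     if len(modified_seq) != len(permissibility_vector.replace('-', '')): # check if lengths match when '-' is removed from action mask
--         raise ValueError("Length of modified_seq does not match the length of permissibility_vector without '-' characters.")
--
--     seq_with_deletions = ''
--     modified_seq_index = 0
--
--     # Iterate over the permissibility_vector and construct seq_with_deletions
--     for char in permissibility_vector:
--         if char == '-':
--             seq_with_deletions += '-'
--         else:
--             seq_with_deletions += modified_seq[modified_seq_index]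
--             modified_seq_index += 1
--
--     return seq_with_deletions
-- ===== SOURCE B (Python) =====
-- def _reinsert_deletions(modified_seq, permissibility_vector):
--     if len(modified_seq) != len(permissibility_vector.replace('-', '')): # check if lengths match when '-' is removed from action mask
--         raise ValueError("Length of modified_seq does not match the length of permissibility_vector without '-' characters.")
--
--     # Insert '-' markers into a copy of modified_seq at the gap positions of the
--     # permissibility vector; ascending index order keeps later indices valid.
--     result = list(modified_seq)
--     for i, char in enumerate(permissibility_vector):
--         if char == '-':
--             result.insert(i, '-')
--     return ''.join(result)
-- ===== Notes on version B (the rewrite author's own statement) =====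
-- stated objective: alternative
-- what changed: Instead of consuming modified_seq character-by-character with a running index while building the output string left-to-right, B copies modified_seq into a list and inserts '-' markers at the gap indices of the permissibility vector in ascending order, then joins.
import Mathlib
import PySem

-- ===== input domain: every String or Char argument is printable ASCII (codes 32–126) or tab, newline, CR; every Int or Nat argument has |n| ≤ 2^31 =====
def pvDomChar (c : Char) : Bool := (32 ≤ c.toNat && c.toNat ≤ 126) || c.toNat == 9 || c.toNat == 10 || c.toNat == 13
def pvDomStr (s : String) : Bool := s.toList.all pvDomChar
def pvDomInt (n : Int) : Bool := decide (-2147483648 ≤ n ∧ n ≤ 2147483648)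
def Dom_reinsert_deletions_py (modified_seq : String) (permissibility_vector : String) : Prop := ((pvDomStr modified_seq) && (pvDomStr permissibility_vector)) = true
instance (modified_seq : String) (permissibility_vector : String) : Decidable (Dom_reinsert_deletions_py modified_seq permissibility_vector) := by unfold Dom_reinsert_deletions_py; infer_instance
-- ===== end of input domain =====

-- B inserts '-' markers into a copy of modified_seq at the gap indices (ascending) instead of
-- consuming modified_seq with a running index; equal return values proved on Pre_ (no ValueError).

-- ===== PORT A =====
-- A: build seq_with_deletions left to right, consuming modified_seq via modified_seq_index.
-- modified_seq[modified_seq_index] is PySem.List.pyGet?; under Pre_ the index is always in range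
-- (Option.toList yields the one character); on the guard branch Python raises ValueError (outside Pre_).
def reinsert_deletions_py (modified_seq : String) (permissibility_vector : String) : String :=
  if PySem.Str.len modified_seq ≠ PySem.Str.len (PySem.Str.replace permissibility_vector "-" "") then
    ""  -- Python: raise ValueError — excluded by Pre_
  else
    String.ofList (permissibility_vector.toList.foldl
      (fun (st : List Char × Nat) c =>
        if c = '-' then (st.1 ++ ['-'], st.2)
        else (st.1 ++ (PySem.List.pyGet? modified_seq.toList (st.2 : Int)).toList, st.2 + 1))
      ([], 0)).1

-- ===== PORT B =====
-- B: result = list(modified_seq); for i, char in enumerate(pv): if char == '-': result.insert(i, '-')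
def reinsert_deletions_py_alt (modified_seq : String) (permissibility_vector : String) : String :=
  if PySem.Str.len modified_seq ≠ PySem.Str.len (PySem.Str.replace permissibility_vector "-" "") then
    ""  -- Python: raise ValueError — excluded by Pre_
  else
    String.ofList ((PySem.List.enumerate permissibility_vector.toList).foldl
      (fun r p => if p.2 = '-' then PySem.List.insert r p.1 '-' else r)
      modified_seq.toList)

-- ===== PRECONDITION & SPEC =====
-- Pre_ excludes exactly the inputs where A raises ValueError: a modified_seq whose length differs
-- from the number of non-'-' characters of the permissibility vector.
def Pre_reinsert_deletions_py (modified_seq : String) (permissibility_vector : String) : Prop :=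
  modified_seq.toList.length = (permissibility_vector.toList.filter (fun c => c ≠ '-')).length
instance (modified_seq : String) (permissibility_vector : String) : Decidable (Pre_reinsert_deletions_py modified_seq permissibility_vector) := by unfold Pre_reinsert_deletions_py; infer_instance

def pvWitness_reinsert_deletions_py : String × String := ("ACD", "A--CD-")

def Spec_reinsert_deletions_py (modified_seq : String) (permissibility_vector : String) (out : String) : Prop := out = reinsert_deletions_py_alt modified_seq permissibility_vector
instance (modified_seq : String) (permissibility_vector : String) (out : String) : Decidable (Spec_reinsert_deletions_py modified_seq permissibility_vector out) := by unfold Spec_reinsert_deletions_py; infer_instance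

-- ===== CLAIM (what is proved, stated in full; the proofs are below) =====
def Claim_equal_reinsert_deletions_py : Prop := ∀ (modified_seq : String) (permissibility_vector : String), Dom_reinsert_deletions_py modified_seq permissibility_vector → Pre_reinsert_deletions_py modified_seq permissibility_vector → Spec_reinsert_deletions_py modified_seq permissibility_vector (reinsert_deletions_py modified_seq permissibility_vector)

-- ===== LEMMAS AND PROOFS =====

-- common specification of the loop result: walk the vector, emitting '-' for gaps and
-- consuming one character of `rest` otherwise
def gapMerge : List Char → List Char → List Char
  | [], _ => []
  | c :: t, rest =>
    if c = '-' then '-' :: gapMerge t rest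
    else match rest with
      | [] => []
      | x :: r => x :: gapMerge t r

lemma insert_at_len (pre rest : List Char) (v : Char) :
    PySem.List.insert (pre ++ rest) (pre.length : Int) v = pre ++ v :: rest := by
  simp only [PySem.List.insert, PySem.List.sliceIndices]
  norm_num [List.length_append]
  rw [if_neg (by omega : ¬ ((pre.length:Int) < 0))]
  rw [Int.toNat_natCast, List.take_left, List.drop_left]

lemma go_filter : ∀ (fuel : Nat) (l acc : List Char), l.length ≤ fuel →
    PySem.Chars.replace.go ['-'] [] fuel l acc = acc.reverse ++ l.filter (fun c => c ≠ '-') := by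
  intro fuel
  induction fuel with
  | zero =>
    intro l acc h
    have : l = [] := List.eq_nil_of_length_eq_zero (Nat.le_zero.mp h)
    subst this; simp [PySem.Chars.replace.go]
  | succ n ih =>
    intro l acc h
    cases l with
    | nil => simp [PySem.Chars.replace.go]
    | cons c t =>
      by_cases hc : c = '-'
      · subst hc
        simp only [PySem.Chars.replace.go, List.isPrefixOf, beq_self_eq_true, Bool.true_and,
          if_pos]
        rw [ih _ _ (by simpa using Nat.le_of_succ_le_succ h)]
        simp
      · have hbc : ('-' == c) = false := by simp [Ne.symm hc]
        simp only [PySem.Chars.replace.go, List.isPrefixOf,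
          Bool.and_true, hbc, Bool.false_eq_true, if_neg, not_false_iff]
        rw [ih _ _ (by simpa using Nat.le_of_succ_le_succ h)]
        simp [hc]

lemma replace_dash (l : List Char) :
    PySem.Chars.replace l ['-'] [] = l.filter (fun c => c ≠ '-') := by
  simp [PySem.Chars.replace, go_filter l.length l [] le_rfl]

-- A's loop: consuming ms = pre ++ rest from index pre.length appends gapMerge pvl rest
lemma a_loop : ∀ (pvl : List Char) (pre rest acc : List Char),
    (pvl.filter (fun c => c ≠ '-')).length = rest.length →
    (pvl.foldl
      (fun (st : List Char × Nat) c =>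
        if c = '-' then (st.1 ++ ['-'], st.2)
        else (st.1 ++ (PySem.List.pyGet? (pre ++ rest) (st.2 : Int)).toList, st.2 + 1))
      (acc, pre.length)).1 = acc ++ gapMerge pvl rest := by
  intro pvl
  induction pvl with
  | nil => intro pre rest acc _; simp [gapMerge]
  | cons c t ih =>
    intro pre rest acc h
    by_cases hc : c = '-'
    · subst hc
      rw [List.foldl_cons, if_pos rfl]
      rw [ih pre rest (acc ++ ['-']) (by simpa using h)]
      simp [gapMerge]
    · cases rest with
      | nil => simp [hc] at h
      | cons x r =>
        rw [List.foldl_cons, if_neg hc, PySem.List.pyGet?_append_length, Option.toList_some]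
        have := ih (pre ++ [x]) r (acc ++ [x]) (by simpa [hc] using h)
        simp only [List.append_assoc, List.singleton_append, List.length_append,
          List.length_singleton] at this
        rw [this]
        simp [gapMerge, hc]

-- B's loop: inserting '-' at ascending indices into pre ++ rest appends gapMerge pvl rest
lemma b_loop : ∀ (pvl : List Char) (pre rest : List Char),
    (pvl.filter (fun c => c ≠ '-')).length = rest.length →
    (PySem.List.enumerate pvl (pre.length : Int)).foldl
      (fun r p => if p.2 = '-' then PySem.List.insert r p.1 '-' else r)
      (pre ++ rest) = pre ++ gapMerge pvl rest := by
  intro pvl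
  induction pvl with
  | nil =>
    intro pre rest h
    have hr : rest = [] := List.eq_nil_of_length_eq_zero (by simpa using h.symm)
    subst hr
    simp [gapMerge, PySem.List.enumerate]
  | cons c t ih =>
    intro pre rest h
    rw [PySem.List.enumerate_cons, List.foldl_cons]
    by_cases hc : c = '-'
    · subst hc
      rw [if_pos rfl, insert_at_len]
      have := ih (pre ++ ['-']) rest (by simpa using h)
      simp only [List.append_assoc, List.singleton_append, List.length_append,
        List.length_singleton, Nat.cast_add, Nat.cast_one] at this
      rw [this]
      simp [gapMerge]
    · cases rest with
      | nil => simp [hc] at h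
      | cons x r =>
        rw [if_neg hc]
        have := ih (pre ++ [x]) r (by simpa [hc] using h)
        simp only [List.append_assoc, List.singleton_append, List.length_append,
          List.length_singleton, Nat.cast_add, Nat.cast_one] at this
        rw [this]
        simp [gapMerge, hc]

-- ===== VERDICT (by name: the statement is the Claim_ definition above) =====
theorem reinsert_deletions_py_spec : Claim_equal_reinsert_deletions_py := by
  intro ms pv _ hpre
  unfold Spec_reinsert_deletions_py Pre_reinsert_deletions_py at *
  unfold reinsert_deletions_py reinsert_deletions_py_alt
  have hguard : ¬ (PySem.Str.len ms ≠ PySem.Str.len (PySem.Str.replace pv "-" "")) := by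
    simp [PySem.Str.len, PySem.Str.replace, replace_dash, decide_not, hpre]
  rw [if_neg hguard, if_neg hguard]
  have ha := a_loop pv.toList [] ms.toList [] hpre.symm
  have hb := b_loop pv.toList [] ms.toList hpre.symm
  simp only [List.nil_append, List.length_nil, Nat.cast_zero] at ha hb
  rw [hb, ha]
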